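-- pv_equiv track=rewrite | github.com/ziminni/master-route-navigation | frontend/views/Announcements/Announcements.py | _resolve_role
-- ===== SOURCE A (Python) =====
-- from typing import List, Tuple
--
-- ROLE_ROUTE: dict[str, Tuple[str, str]] = {
--     "admin":        ("views.Announcements.AnnouncementAdmin",        "AnnouncementAdmin"),
--     "faculty":      ("views.Announcements.AnnouncementFaculty",      "AnnouncementFaculty"),
--     # Staff uses the same page as the old "organization" view
--     "staff":        ("views.Announcements.AnnouncementOrganization", "AnnouncementOrganization"),
--     "student":      ("views.Announcements.AnnouncementStudent",      "AnnouncementStudent"),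
--     # legacy: if something still passes "organization" as a role, treat it as staff
--     "organization": ("views.Announcements.AnnouncementOrganization", "AnnouncementOrganization"),
-- }
--
-- PRIORITY: List[str] = ["admin", "faculty", "staff", "student"]
--
-- def _norm_roles(roles: List[str] | None) -> List[str]:
--     return [(r or "").strip().lower() for r in (roles or []) if r]
--
-- def _resolve_role(roles: List[str] | None, primary_role: str | None) -> str:
--     rlist = _norm_roles(roles)
--     pr = (primary_role or "").strip().lower()
--
--     # legacy mapping: "organization" behaves as "staff"
--     if pr == "organization":
--         pr = "staff"
--     rlist = ["staff" if r == "organization" else r for r in rlist]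
--
--     # 1) same rule as Showcase: trust primary_role if it matches a key
--     if pr in ROLE_ROUTE:
--         return pr
--
--     # 2) walk priority list through roles[]
--     for r in PRIORITY:
--         if r in rlist:
--             return r
--
--     # 3) nothing matched
--     return ""
-- ===== SOURCE B (Python) =====
-- PRIORITY = ["admin", "faculty", "staff", "student"]
--
-- def _resolve_role(roles, primary_role):
--     pr = (primary_role or "").strip().lower()
--     if pr == "organization":
--         pr = "staff"
--     if pr in ("admin", "faculty", "staff", "student"):
--         return pr
--     # single pass over the data, keeping the best (smallest) priority rank seen
--     best = len(PRIORITY)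
--     for r in (roles or []):
--         if not r:
--             continue
--         n = r.strip().lower()
--         if n == "organization":
--             n = "staff"
--         i = PRIORITY.index(n) if n in PRIORITY else len(PRIORITY)
--         if i < best:
--             best = i
--     return PRIORITY[best] if best < len(PRIORITY) else ""
-- ===== Notes on version B (the rewrite author's own statement) =====
-- stated objective: alternative
-- what changed: Replaces the walk over PRIORITY with membership tests on the normalized role list by a single pass over the roles themselves that keeps the smallest PRIORITY rank seen (and drops the intermediate normalized-list construction).
import Mathlib
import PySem

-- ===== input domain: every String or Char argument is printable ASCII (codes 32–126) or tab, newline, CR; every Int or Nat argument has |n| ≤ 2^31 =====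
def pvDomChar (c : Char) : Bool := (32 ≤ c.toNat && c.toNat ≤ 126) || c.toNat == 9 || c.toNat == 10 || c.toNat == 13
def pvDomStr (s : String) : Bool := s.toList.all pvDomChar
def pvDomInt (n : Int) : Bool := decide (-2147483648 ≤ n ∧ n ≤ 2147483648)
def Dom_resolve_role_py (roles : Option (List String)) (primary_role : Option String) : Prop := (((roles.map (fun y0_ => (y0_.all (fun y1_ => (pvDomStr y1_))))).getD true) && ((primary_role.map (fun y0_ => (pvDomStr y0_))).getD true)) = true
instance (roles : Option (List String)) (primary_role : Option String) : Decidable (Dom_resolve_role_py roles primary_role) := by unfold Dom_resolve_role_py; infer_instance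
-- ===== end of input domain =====

-- B is a different decomposition: one pass over the roles keeping the smallest PRIORITY rank,
-- instead of walking PRIORITY with membership tests on a normalized list. Same cost.

-- ===== PORT A =====

def ROLE_ROUTE : PySem.Dict String (String × String) :=
  PySem.Dict.ofList [
    ("admin",        ("views.Announcements.AnnouncementAdmin",        "AnnouncementAdmin")),
    ("faculty",      ("views.Announcements.AnnouncementFaculty",      "AnnouncementFaculty")),
    ("staff",        ("views.Announcements.AnnouncementOrganization", "AnnouncementOrganization")),
    ("student",      ("views.Announcements.AnnouncementStudent",      "AnnouncementStudent")),
    ("organization", ("views.Announcements.AnnouncementOrganization", "AnnouncementOrganization"))]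

def PRIORITY : List String := ["admin", "faculty", "staff", "student"]

def norm_roles (roles : Option (List String)) : List String :=
  ((roles.getD []).filter (fun r => r ≠ "")).map
    (fun r => PySem.Str.lower (PySem.Str.strip r))

-- walk of `for r in PRIORITY: if r in rlist: return r` then `return ""`
def walkPriority : List String → List String → String
  | [], _ => ""
  | r :: rest, rlist => if rlist.contains r then r else walkPriority rest rlist

def resolve_role_py (roles : Option (List String)) (primary_role : Option String) : String :=
  let rlist := norm_roles roles
  let pr := PySem.Str.lower (PySem.Str.strip (primary_role.getD ""))
  let pr := if pr = "organization" then "staff" else pr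
  let rlist := rlist.map (fun r => if r = "organization" then "staff" else r)
  if ROLE_ROUTE.contains pr then pr
  else walkPriority PRIORITY rlist

-- ===== PORT B =====

def rankStep (b : Nat) (r : String) : Nat :=
  if r = "" then b
  else
    let n := PySem.Str.lower (PySem.Str.strip r)
    let n := if n = "organization" then "staff" else n
    let i := if PRIORITY.contains n then (PySem.List.index? PRIORITY n).getD PRIORITY.length
             else PRIORITY.length
    if i < b then i else b

def resolve_role_py_alt (roles : Option (List String)) (primary_role : Option String) : String :=
  let pr := PySem.Str.lower (PySem.Str.strip (primary_role.getD ""))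
  let pr := if pr = "organization" then "staff" else pr
  if pr = "admin" ∨ pr = "faculty" ∨ pr = "staff" ∨ pr = "student" then pr
  else
    let best := (roles.getD []).foldl rankStep PRIORITY.length
    if best < PRIORITY.length then PRIORITY.getD best "" else ""

-- ===== PRECONDITION & SPEC =====
def Spec_resolve_role_py (roles : Option (List String)) (primary_role : Option String) (out : String) : Prop := out = resolve_role_py_alt roles primary_role
instance (roles : Option (List String)) (primary_role : Option String) (out : String) : Decidable (Spec_resolve_role_py roles primary_role out) := by unfold Spec_resolve_role_py; infer_instance

-- ===== CLAIM (what is proved, stated in full; the proofs are below) =====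
def Claim_equal_resolve_role_py : Prop := ∀ (roles : Option (List String)) (primary_role : Option String), Dom_resolve_role_py roles primary_role → Spec_resolve_role_py roles primary_role (resolve_role_py roles primary_role)




-- ===== LEMMAS AND PROOFS =====

-- the full normalization A applies to each kept role (strip+lower then legacy remap)
def normf (r : String) : String :=
  let n := PySem.Str.lower (PySem.Str.strip r)
  if n = "organization" then "staff" else n

def rankOf (n : String) : Nat :=
  if n = "admin" then 0 else if n = "faculty" then 1 else if n = "staff" then 2
  else if n = "student" then 3 else 4

lemma rankOf_le_four (n : String) : rankOf n ≤ 4 := by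
  unfold rankOf; split_ifs <;> omega

lemma idx_eq (n : String) :
    (if PRIORITY.contains n then (PySem.List.index? PRIORITY n).getD PRIORITY.length
     else PRIORITY.length) = rankOf n := by
  by_cases h0 : n = "admin"
  · subst h0; decide
  by_cases h1 : n = "faculty"
  · subst h1; decide
  by_cases h2 : n = "staff"
  · subst h2; decide
  by_cases h3 : n = "student"
  · subst h3; decide
  simp [PRIORITY, rankOf, h0, h1, h2, h3]

lemma rankStep_eq (b : Nat) (r : String) :
    rankStep b r = if r = "" then b else min (rankOf (normf r)) b := by
  unfold rankStep normf
  by_cases hr : r = ""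
  · simp [hr]
  · simp only [hr, if_false]
    rw [idx_eq, Nat.min_def]
    split_ifs <;> omega

-- minimal rank over the raw role list
def minRank : List String → Nat
  | [] => 4
  | x :: t => if x = "" then minRank t else min (rankOf (normf x)) (minRank t)

lemma minRank_le_four (xs : List String) : minRank xs ≤ 4 := by
  induction xs with
  | nil => simp [minRank]
  | cons x t ih => unfold minRank; split_ifs <;> omega

lemma foldl_rankStep (xs : List String) (b : Nat) (hb : b ≤ 4) :
    xs.foldl rankStep b = min b (minRank xs) := by
  induction xs generalizing b with
  | nil => simp only [List.foldl_nil, minRank]; omega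
  | cons x t ih =>
    simp only [List.foldl_cons, rankStep_eq, minRank]
    by_cases hx : x = ""
    · simp [hx, ih b hb]
    · have h4 := rankOf_le_four (normf x)
      simp only [hx, if_false]
      rw [ih _ (by omega)]
      omega

lemma minRank_le_iff (xs : List String) (k : Nat) :
    minRank xs ≤ k ↔ k ≥ 4 ∨ ∃ x ∈ xs, x ≠ "" ∧ rankOf (normf x) ≤ k := by
  induction xs with
  | nil =>
    simp only [minRank]
    constructor
    · intro h; exact Or.inl h
    · rintro (h | ⟨x, hx, _⟩)
      · exact h
      · simp at hx
  | cons x t ih =>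
    unfold minRank
    by_cases hx : x = ""
    · simp only [hx, if_true, ih, List.mem_cons]
      constructor
      · rintro (h | ⟨y, hy, h1, h2⟩)
        · exact Or.inl h
        · exact Or.inr ⟨y, Or.inr hy, h1, h2⟩
      · rintro (h | ⟨y, (rfl | hy), h1, h2⟩)
        · exact Or.inl h
        · exact absurd rfl h1
        · exact Or.inr ⟨y, hy, h1, h2⟩
    · simp only [hx, if_false, List.mem_cons]
      constructor
      · intro h
        rcases min_le_iff.mp h with h | h
        · exact Or.inr ⟨x, Or.inl rfl, hx, h⟩
        · rcases ih.mp h with h | ⟨y, hy, h1, h2⟩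
          · exact Or.inl h
          · exact Or.inr ⟨y, Or.inr hy, h1, h2⟩
      · rintro (h | ⟨y, (rfl | hy), h1, h2⟩)
        · exact min_le_iff.mpr (Or.inr (ih.mpr (Or.inl h)))
        · exact min_le_iff.mpr (Or.inl h2)
        · exact min_le_iff.mpr (Or.inr (ih.mpr (Or.inr ⟨y, hy, h1, h2⟩)))

def rlistOf (roles : Option (List String)) : List String :=
  (norm_roles roles).map (fun r => if r = "organization" then "staff" else r)

lemma mem_rlist_iff (roles : Option (List String)) (r : String) :
    (r ∈ rlistOf roles) ↔
      ∃ x ∈ roles.getD [], x ≠ "" ∧ normf x = r := by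
  simp only [rlistOf, norm_roles, List.mem_map, List.mem_filter, normf]
  constructor
  · rintro ⟨n, ⟨x, ⟨hx, hne⟩, rfl⟩, rfl⟩
    exact ⟨x, hx, by simpa using hne, rfl⟩
  · rintro ⟨x, hx, hne, rfl⟩
    exact ⟨_, ⟨x, ⟨hx, by simpa using hne⟩, rfl⟩, rfl⟩

lemma rankOf_le0 (n : String) : rankOf n ≤ 0 ↔ n = "admin" := by
  unfold rankOf; split_ifs <;> simp_all
lemma rankOf_le1 (n : String) : rankOf n ≤ 1 ↔ n = "admin" ∨ n = "faculty" := by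
  unfold rankOf; split_ifs <;> simp_all
lemma rankOf_le2 (n : String) : rankOf n ≤ 2 ↔ n = "admin" ∨ n = "faculty" ∨ n = "staff" := by
  unfold rankOf; split_ifs <;> simp_all
lemma rankOf_le3 (n : String) :
    rankOf n ≤ 3 ↔ n = "admin" ∨ n = "faculty" ∨ n = "staff" ∨ n = "student" := by
  unfold rankOf; split_ifs <;> simp_all

-- each contains-test of A's walk, expressed through minRank
lemma contains_iff0 (roles : Option (List String)) :
    ("admin" ∈ rlistOf roles) ↔ minRank (roles.getD []) ≤ 0 := by
  rw [mem_rlist_iff, minRank_le_iff]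
  constructor
  · rintro ⟨x, hx, h1, h2⟩; exact Or.inr ⟨x, hx, h1, by rw [rankOf_le0]; exact h2⟩
  · rintro (h | ⟨x, hx, h1, h2⟩)
    · omega
    · exact ⟨x, hx, h1, (rankOf_le0 _).mp h2⟩

lemma contains_iff1 (roles : Option (List String)) :
    ("admin" ∈ rlistOf roles ∨ "faculty" ∈ rlistOf roles) ↔
      minRank (roles.getD []) ≤ 1 := by
  rw [mem_rlist_iff, mem_rlist_iff, minRank_le_iff]
  constructor
  · rintro (⟨x, hx, h1, h2⟩ | ⟨x, hx, h1, h2⟩)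
    · exact Or.inr ⟨x, hx, h1, (rankOf_le1 _).mpr (Or.inl h2)⟩
    · exact Or.inr ⟨x, hx, h1, (rankOf_le1 _).mpr (Or.inr h2)⟩
  · rintro (h | ⟨x, hx, h1, h2⟩)
    · omega
    · rcases (rankOf_le1 _).mp h2 with h | h
      · exact Or.inl ⟨x, hx, h1, h⟩
      · exact Or.inr ⟨x, hx, h1, h⟩

lemma contains_iff2 (roles : Option (List String)) :
    ("admin" ∈ rlistOf roles ∨ "faculty" ∈ rlistOf roles ∨
      "staff" ∈ rlistOf roles) ↔ minRank (roles.getD []) ≤ 2 := by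
  rw [mem_rlist_iff, mem_rlist_iff, mem_rlist_iff, minRank_le_iff]
  constructor
  · rintro (⟨x, hx, h1, h2⟩ | ⟨x, hx, h1, h2⟩ | ⟨x, hx, h1, h2⟩)
    · exact Or.inr ⟨x, hx, h1, (rankOf_le2 _).mpr (Or.inl h2)⟩
    · exact Or.inr ⟨x, hx, h1, (rankOf_le2 _).mpr (Or.inr (Or.inl h2))⟩
    · exact Or.inr ⟨x, hx, h1, (rankOf_le2 _).mpr (Or.inr (Or.inr h2))⟩
  · rintro (h | ⟨x, hx, h1, h2⟩)
    · omega
    · rcases (rankOf_le2 _).mp h2 with h | h | h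
      · exact Or.inl ⟨x, hx, h1, h⟩
      · exact Or.inr (Or.inl ⟨x, hx, h1, h⟩)
      · exact Or.inr (Or.inr ⟨x, hx, h1, h⟩)

lemma contains_iff3 (roles : Option (List String)) :
    ("admin" ∈ rlistOf roles ∨ "faculty" ∈ rlistOf roles ∨
      "staff" ∈ rlistOf roles ∨ "student" ∈ rlistOf roles) ↔
      minRank (roles.getD []) ≤ 3 := by
  rw [mem_rlist_iff, mem_rlist_iff, mem_rlist_iff, mem_rlist_iff, minRank_le_iff]
  constructor
  · rintro (⟨x, hx, h1, h2⟩ | ⟨x, hx, h1, h2⟩ | ⟨x, hx, h1, h2⟩ | ⟨x, hx, h1, h2⟩)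
    · exact Or.inr ⟨x, hx, h1, (rankOf_le3 _).mpr (Or.inl h2)⟩
    · exact Or.inr ⟨x, hx, h1, (rankOf_le3 _).mpr (Or.inr (Or.inl h2))⟩
    · exact Or.inr ⟨x, hx, h1, (rankOf_le3 _).mpr (Or.inr (Or.inr (Or.inl h2)))⟩
    · exact Or.inr ⟨x, hx, h1, (rankOf_le3 _).mpr (Or.inr (Or.inr (Or.inr h2)))⟩
  · rintro (h | ⟨x, hx, h1, h2⟩)
    · omega
    · rcases (rankOf_le3 _).mp h2 with h | h | h | h
      · exact Or.inl ⟨x, hx, h1, h⟩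
      · exact Or.inr (Or.inl ⟨x, hx, h1, h⟩)
      · exact Or.inr (Or.inr (Or.inl ⟨x, hx, h1, h⟩))
      · exact Or.inr (Or.inr (Or.inr ⟨x, hx, h1, h⟩))

lemma walk_cons (r : String) (rest rlist : List String) :
    walkPriority (r :: rest) rlist = if rlist.contains r then r else walkPriority rest rlist := rfl

lemma walk_nil (rlist : List String) : walkPriority [] rlist = "" := rfl

-- A's priority walk equals B's best-rank lookup
lemma priority_eq (roles : Option (List String)) :
    walkPriority PRIORITY
        ((norm_roles roles).map (fun r => if r = "organization" then "staff" else r)) =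
      (if (roles.getD []).foldl rankStep PRIORITY.length < PRIORITY.length
       then PRIORITY.getD ((roles.getD []).foldl rankStep PRIORITY.length) ""
       else "") := by
  show walkPriority PRIORITY (rlistOf roles) = _
  have hlen : PRIORITY.length = 4 := rfl
  rw [hlen, foldl_rankStep _ _ (by omega)]
  have hm4 := minRank_le_four (roles.getD [])
  rw [show walkPriority PRIORITY (rlistOf roles) =
      (if (rlistOf roles).contains "admin" then "admin"
       else if (rlistOf roles).contains "faculty" then "faculty"
       else if (rlistOf roles).contains "staff" then "staff"
       else if (rlistOf roles).contains "student" then "student"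
       else "") from by rw [PRIORITY, walk_cons, walk_cons, walk_cons, walk_cons, walk_nil]]
  by_cases h0 : "admin" ∈ rlistOf roles
  · have e : minRank (roles.getD []) = 0 := by
      have := (contains_iff0 roles).mp h0; omega
    rw [e]; simp [h0, PRIORITY]
  by_cases h1 : "faculty" ∈ rlistOf roles
  · have e : minRank (roles.getD []) = 1 := by
      have a := (contains_iff1 roles).mp (Or.inr h1)
      have b : ¬ minRank (roles.getD []) ≤ 0 := fun hh => h0 ((contains_iff0 roles).mpr hh)
      omega
    rw [e]; simp [h0, h1, PRIORITY]
  by_cases h2 : "staff" ∈ rlistOf roles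
  · have e : minRank (roles.getD []) = 2 := by
      have a := (contains_iff2 roles).mp (Or.inr (Or.inr h2))
      have b : ¬ minRank (roles.getD []) ≤ 1 := fun hh => by
        rcases (contains_iff1 roles).mpr hh with c | c
        · exact h0 c
        · exact h1 c
      omega
    rw [e]; simp [h0, h1, h2, PRIORITY]
  by_cases h3 : "student" ∈ rlistOf roles
  · have e : minRank (roles.getD []) = 3 := by
      have a := (contains_iff3 roles).mp (Or.inr (Or.inr (Or.inr h3)))
      have b : ¬ minRank (roles.getD []) ≤ 2 := fun hh => by
        rcases (contains_iff2 roles).mpr hh with c | c | c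
        · exact h0 c
        · exact h1 c
        · exact h2 c
      omega
    rw [e]; simp [h0, h1, h2, h3, PRIORITY]
  · have e : minRank (roles.getD []) = 4 := by
      have b : ¬ minRank (roles.getD []) ≤ 3 := fun hh => by
        rcases (contains_iff3 roles).mpr hh with c | c | c | c
        · exact h0 c
        · exact h1 c
        · exact h2 c
        · exact h3 c
      omega
    rw [e]; simp [h0, h1, h2, h3]

-- A's guard (key of ROLE_ROUTE) coincides with B's tuple test, after the legacy remap
lemma guard_eq (p : String) :
    ROLE_ROUTE.contains (if p = "organization" then "staff" else p) = true ↔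
      ((if p = "organization" then "staff" else p) = "admin" ∨
       (if p = "organization" then "staff" else p) = "faculty" ∨
       (if p = "organization" then "staff" else p) = "staff" ∨
       (if p = "organization" then "staff" else p) = "student") := by
  have hRR : ROLE_ROUTE = PySem.Dict.mk [
      ("admin",        ("views.Announcements.AnnouncementAdmin",        "AnnouncementAdmin")),
      ("faculty",      ("views.Announcements.AnnouncementFaculty",      "AnnouncementFaculty")),
      ("staff",        ("views.Announcements.AnnouncementOrganization", "AnnouncementOrganization")),
      ("student",      ("views.Announcements.AnnouncementStudent",      "AnnouncementStudent")),
      ("organization", ("views.Announcements.AnnouncementOrganization", "AnnouncementOrganization"))] := by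
    decide
  by_cases ho : p = "organization"
  · subst ho; decide
  simp only [ho, if_false]
  by_cases h0 : p = "admin"
  · subst h0; decide
  by_cases h1 : p = "faculty"
  · subst h1; decide
  by_cases h2 : p = "staff"
  · subst h2; decide
  by_cases h3 : p = "student"
  · subst h3; decide
  simp [hRR, PySem.Dict.contains_mk, h0, h1, h2, h3,
    Ne.symm h0, Ne.symm h1, Ne.symm h2, Ne.symm h3, Ne.symm ho]

-- ===== VERDICT (by name: the statement is the Claim_ definition above) =====
theorem resolve_role_py_spec : Claim_equal_resolve_role_py := by
  intro roles primary_role _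
  unfold Spec_resolve_role_py resolve_role_py resolve_role_py_alt
  dsimp only
  by_cases hg : ((if PySem.Str.lower (PySem.Str.strip (primary_role.getD "")) = "organization"
        then "staff" else PySem.Str.lower (PySem.Str.strip (primary_role.getD ""))) = "admin" ∨
      (if PySem.Str.lower (PySem.Str.strip (primary_role.getD "")) = "organization"
        then "staff" else PySem.Str.lower (PySem.Str.strip (primary_role.getD ""))) = "faculty" ∨
      (if PySem.Str.lower (PySem.Str.strip (primary_role.getD "")) = "organization"
        then "staff" else PySem.Str.lower (PySem.Str.strip (primary_role.getD ""))) = "staff" ∨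
      (if PySem.Str.lower (PySem.Str.strip (primary_role.getD "")) = "organization"
        then "staff" else PySem.Str.lower (PySem.Str.strip (primary_role.getD ""))) = "student")
  · rw [if_pos ((guard_eq _).mpr hg), if_pos hg]
  · rw [if_neg (fun h => hg ((guard_eq _).mp h)), if_neg hg]
    exact priority_eq roles
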